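-- pv_equiv track=rewrite | github.com/aprilissy/cs-guided-project-computer-memory-basics | src/whiteboarding.py | zeros_to_the_right
-- ===== SOURCE A (Python) =====
-- def zeros_to_the_right(num_array):
--   try:
--     num_array.index(0)
--     sort = num_array.sort(reverse=True)
--     while num_array[-1] != 0:
--       num_array = num_array[-1:] + num_array[:-1]
--     return num_array
--   except:
--     return num_array
-- ===== SOURCE B (Python) =====
-- def zeros_to_the_right(num_array):
--     # Return-value equivalent to A; single rotation instead of A's per-element rotation loop.
--     # (A additionally sorts its argument in place when 0 is present.)
--     if 0 in num_array:
--         s = sorted(num_array, reverse=True)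
--         m = sum(1 for x in s if x < 0)
--         cut = len(s) - m
--         return s[cut:] + s[:cut]
--     return num_array
-- ===== Notes on version B (the rewrite author's own statement) =====
-- stated objective: alternative
-- what changed: B replaces A's one-element-at-a-time rotation loop (rotate until the last element is 0) by counting the negatives of the descending-sorted list once and doing a single two-slice rotation; B also does not mutate its argument (A sorts it in place).
import Mathlib
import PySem

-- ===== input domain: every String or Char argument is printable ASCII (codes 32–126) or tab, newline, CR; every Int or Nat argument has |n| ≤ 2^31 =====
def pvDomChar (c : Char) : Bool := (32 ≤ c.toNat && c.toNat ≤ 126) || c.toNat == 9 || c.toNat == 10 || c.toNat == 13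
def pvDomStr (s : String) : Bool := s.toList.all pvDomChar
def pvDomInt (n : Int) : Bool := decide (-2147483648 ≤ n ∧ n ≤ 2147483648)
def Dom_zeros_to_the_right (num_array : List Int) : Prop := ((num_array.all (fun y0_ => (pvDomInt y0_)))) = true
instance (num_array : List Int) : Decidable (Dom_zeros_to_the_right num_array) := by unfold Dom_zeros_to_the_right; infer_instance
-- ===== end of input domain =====

-- B computes A's rotate-until-last-is-zero result with one negatives count and a single two-slice
-- rotation instead of A's per-element rotation loop; equivalence is about the RETURN value only —
-- A sorts its argument in place when 0 is present, B does not mutate it.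


-- ===== PORT A =====
-- A's while loop: 'while num_array[-1] != 0: num_array = num_array[-1:] + num_array[:-1]'.
-- Fuel bounds the recursion (fuel = length suffices: the loop runs once per negative element);
-- the pyGet? none case (empty list) is unreachable when 0 is in the list.
def pvRotLoop : Nat → List Int → List Int
  | 0, l => l
  | fuel+1, l =>
    match PySem.List.pyGet? l (-1) with
    | none => l
    | some v =>
      if v ≠ 0 then
        pvRotLoop fuel (PySem.List.slice l (some (-1)) none ++ PySem.List.slice l none (some (-1)))
      else l

def zeros_to_the_right (num_array : List Int) : List Int :=
  match PySem.List.index? num_array 0 with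
  | none => num_array          -- .index(0) raised ValueError, caught by 'except'
  | some _ =>
    let s := PySem.List.sorted num_array (fun x => x) true
    pvRotLoop s.length s

-- ===== PORT B =====
def zeros_to_the_right_alt (num_array : List Int) : List Int :=
  if num_array.contains 0 then
    let s := PySem.List.sorted num_array (fun x => x) true
    let m := s.countP (fun x => decide (x < 0))
    let cut := s.length - m
    PySem.List.slice s (some (cut : Int)) none ++ PySem.List.slice s none (some (cut : Int))
  else num_array

-- ===== PRECONDITION & SPEC =====
def Spec_zeros_to_the_right (num_array : List Int) (out : List Int) : Prop := out = zeros_to_the_right_alt num_array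
instance (num_array : List Int) (out : List Int) : Decidable (Spec_zeros_to_the_right num_array out) := by unfold Spec_zeros_to_the_right; infer_instance

-- ===== CLAIM (what is proved, stated in full; the proofs are below) =====
def Claim_equal_zeros_to_the_right : Prop := ∀ (num_array : List Int), Dom_zeros_to_the_right num_array → Spec_zeros_to_the_right num_array (zeros_to_the_right num_array)

-- ===== LEMMAS AND PROOFS =====

-- once the last element is 0 the loop stops immediately
lemma pvRotLoop_of_getLast?_zero (fuel : Nat) (l : List Int) (h : l.getLast? = some 0) :
    pvRotLoop fuel l = l := by
  cases fuel with
  | zero => rfl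
  | succ f =>
    simp [pvRotLoop, PySem.List.pyGet?_neg_one, h]

-- the loop moves the negative suffix b (one element per iteration) in front of a,
-- stopping when a's last element (a zero) becomes last
lemma pvRotLoop_spec (b : List Int) (hb : ∀ x ∈ b, x < 0) :
    ∀ (a : List Int) (fuel : Nat), a.getLast? = some 0 → b.length ≤ fuel →
      pvRotLoop fuel (a ++ b) = b ++ a := by
  induction b using List.reverseRecOn with
  | nil =>
    intro a fuel ha _
    simpa using pvRotLoop_of_getLast?_zero fuel a ha
  | append_singleton b' x ih =>
    intro a fuel ha hfuel
    have hx : x < 0 := hb x (by simp)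
    have hb' : ∀ y ∈ b', y < 0 := fun y hy => hb y (by simp [hy])
    obtain ⟨f, rfl⟩ : ∃ f, fuel = f + 1 := by
      rcases fuel with _ | f
      · simp at hfuel
      · exact ⟨f, rfl⟩
    have hget : PySem.List.pyGet? (a ++ (b' ++ [x])) (-1) = some x := by
      rw [← List.append_assoc]
      exact PySem.List.pyGet?_neg_one_append_singleton (a ++ b') x
    have hslice1 : PySem.List.slice (a ++ (b' ++ [x])) (some (-1)) none = [x] := by
      rw [PySem.List.slice_from_neg_one, ← List.append_assoc]
      simp
    have hslice2 : PySem.List.slice (a ++ (b' ++ [x])) none (some (-1)) = a ++ b' := by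
      rw [PySem.List.slice_to_neg_one, ← List.append_assoc]
      simp
    have hane : a ≠ [] := by
      intro h; rw [h] at ha; simp at ha
    have ha' : (x :: a).getLast? = some 0 := by
      rcases a with _ | ⟨h, t⟩
      · exact absurd rfl hane
      · rw [List.getLast?_cons_cons]; exact ha
    have step : pvRotLoop (f + 1) (a ++ (b' ++ [x]))
        = pvRotLoop f ((x :: a) ++ b') := by
      simp only [pvRotLoop, hget, hslice1, hslice2]
      rw [if_pos (by omega)]
      rfl
    rw [step, ih hb' (x :: a) f ha' (by simp at hfuel ⊢; omega)]
    simp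

-- last element of a ≥-sorted list is ≤ every member
lemma getLast?_le_of_pairwise_ge (l : List Int) (hp : l.Pairwise (fun a b => b ≤ a))
    (x : Int) (hx : x ∈ l) (y : Int) (hy : l.getLast? = some y) : y ≤ x := by
  rw [List.getLast?_eq_head?_reverse] at hy
  have hpr : l.reverse.Pairwise (fun a b => a ≤ b) := by
    rw [List.pairwise_reverse]; exact hp
  rcases hr : l.reverse with _ | ⟨z, t⟩
  · rw [hr] at hy; simp at hy
  · rw [hr] at hy; simp at hy; subst hy
    have hx' : x ∈ l.reverse := by simpa using hx
    rw [hr] at hx'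
    rcases List.mem_cons.mp hx' with h | h
    · omega
    · rw [hr] at hpr
      exact (List.pairwise_cons.mp hpr).1 x h

lemma main_sorted_case (num_array : List Int) (h0 : (0 : Int) ∈ num_array) :
    pvRotLoop (PySem.List.sorted num_array (fun x => x) true).length
        (PySem.List.sorted num_array (fun x => x) true)
      = (PySem.List.slice (PySem.List.sorted num_array (fun x => x) true)
          (some (((PySem.List.sorted num_array (fun x => x) true).length -
            (PySem.List.sorted num_array (fun x => x) true).countP (fun x => decide (x < 0)) : Nat) : Int)) none)
        ++ (PySem.List.slice (PySem.List.sorted num_array (fun x => x) true) none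
          (some (((PySem.List.sorted num_array (fun x => x) true).length -
            (PySem.List.sorted num_array (fun x => x) true).countP (fun x => decide (x < 0)) : Nat) : Int))) := by
  set s := PySem.List.sorted num_array (fun x => x) true with hs
  have hmem : (0 : Int) ∈ s := by rw [hs, PySem.List.mem_sorted]; exact h0
  have hp : s.Pairwise (fun a b => b ≤ a) := by
    rw [hs]; exact PySem.List.sorted_pairwise_rev num_array (fun x => x)
  set a := s.takeWhile (fun x => decide ((0:Int) ≤ x)) with hadef
  set b := s.dropWhile (fun x => decide ((0:Int) ≤ x)) with hbdef
  have hab : a ++ b = s := by rw [hadef, hbdef]; exact List.takeWhile_append_dropWhile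
  have hamem : ∀ x ∈ a, (0:Int) ≤ x := by
    intro x hx
    have := List.mem_takeWhile_imp (hadef ▸ hx)
    simpa using this
  -- every element of b is negative
  have hpb : b.Pairwise (fun a b => b ≤ a) := by
    rw [← hab] at hp; exact (List.pairwise_append.mp hp).2.1
  have hbneg : ∀ x ∈ b, x < 0 := by
    rcases hbb : b with _ | ⟨y, t⟩
    · intro x hx; simp at hx
    · have hy : ¬ ((0:Int) ≤ y) := by
        have h := List.head?_dropWhile_not (fun x => decide ((0:Int) ≤ x)) s
        rw [← hbdef, hbb] at h
        simpa using h
      rw [hbb] at hpb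
      intro x hx
      rcases List.mem_cons.mp hx with h | h
      · omega
      · have := (List.pairwise_cons.mp hpb).1 x h; omega
  -- 0 ∈ a and a ends in 0
  have h0a : (0 : Int) ∈ a := by
    rcases (by rw [hab]; exact hmem : (0:Int) ∈ a ++ b) |> List.mem_append.mp with h | h
    · exact h
    · exact absurd (hbneg 0 h) (by omega)
  have hane : a ≠ [] := List.ne_nil_of_mem h0a
  have hpa : a.Pairwise (fun a b => b ≤ a) := by
    rw [← hab] at hp; exact (List.pairwise_append.mp hp).1
  obtain ⟨y, hy⟩ := List.getLast?_isSome.mpr hane |> Option.isSome_iff_exists.mp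
  have hy0 : y = 0 := by
    have h1 : y ≤ 0 := getLast?_le_of_pairwise_ge a hpa 0 h0a y hy
    have h2 : 0 ≤ y := hamem y (List.mem_of_getLast? hy)
    omega
  subst hy0
  -- count of negatives = length of b, so cut = a.length
  have hcount : s.countP (fun x => decide (x < 0)) = b.length := by
    rw [← hab, List.countP_append]
    have h1 : a.countP (fun x => decide (x < 0)) = 0 := by
      rw [List.countP_eq_zero]
      intro x hx; have := hamem x hx; simpa using by omega
    have h2 : b.countP (fun x => decide (x < 0)) = b.length := by
      rw [List.countP_eq_length]
      intro x hx; have := hbneg x hx; simpa using this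
    omega
  have hlen : s.length = a.length + b.length := by rw [← hab]; simp
  have hcut : s.length - s.countP (fun x => decide (x < 0)) = a.length := by omega
  rw [hcut, PySem.List.slice_from_natCast, PySem.List.slice_to_natCast, ← hab,
    List.drop_left, List.take_left]
  exact pvRotLoop_spec b hbneg a (a ++ b).length hy (by simp)

-- ===== VERDICT (by name: the statement is the Claim_ definition above) =====
theorem zeros_to_the_right_spec : Claim_equal_zeros_to_the_right := by
  intro num_array _
  unfold Spec_zeros_to_the_right zeros_to_the_right zeros_to_the_right_alt
  by_cases h0 : (0 : Int) ∈ num_array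
  · have hc : num_array.contains 0 = true := by simpa using h0
    obtain ⟨k, hk⟩ := Option.isSome_iff_exists.mp ((PySem.List.index?_isSome_iff num_array 0).mpr h0)
    rw [hk, if_pos hc]
    exact main_sorted_case num_array h0
  · have hn : PySem.List.index? num_array 0 = none :=
      (PySem.List.index?_eq_none_iff num_array 0).mpr h0
    have hc : num_array.contains 0 = false := by simpa using h0
    rw [hn, hc]
    simp
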